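-- pv_equiv track=rewrite | github.com/AOE-khkhan/GHOST | dump/brain_functions - with obj fetch.py | getModelMax
-- ===== SOURCE A (Python) =====
-- def getModelMax(Model):
--     d = {}
--     model = ''
--     for n in range(len(Model)):
--         if Model[n] in d.keys():
--             d[Model[n]] += 1
--         else:
--             d.setdefault(Model[n], 1)
--
--     ind = [x for x in d.values()]
--
--     if len(ind) > 0:
--         m = max(ind)
--
--         if ind.count(m) == 1:
--             index = ind.index(m)
--             model = [x for x in d.keys()][index]
--     return model
-- ===== SOURCE B (Python) =====
-- def getModelMax(Model):
--     d = {}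
--     for x in Model:
--         d[x] = d.get(x, 0) + 1
--     best_count = 0
--     best_key = ''
--     unique = False
--     for k, c in d.items():
--         if c > best_count:
--             best_count, best_key, unique = c, k, True
--         elif c == best_count:
--             unique = False
--     return best_key if unique else ''
-- ===== Notes on version B (the rewrite author's own statement) =====
-- stated objective: alternative
-- what changed: A materializes the dict's values list and runs max(), count() and index() over it plus a keys-list indexing; B makes a single pass over d.items() maintaining a running (best_count, best_key, unique) triple and returns best_key only when unique.
import Mathlib
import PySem

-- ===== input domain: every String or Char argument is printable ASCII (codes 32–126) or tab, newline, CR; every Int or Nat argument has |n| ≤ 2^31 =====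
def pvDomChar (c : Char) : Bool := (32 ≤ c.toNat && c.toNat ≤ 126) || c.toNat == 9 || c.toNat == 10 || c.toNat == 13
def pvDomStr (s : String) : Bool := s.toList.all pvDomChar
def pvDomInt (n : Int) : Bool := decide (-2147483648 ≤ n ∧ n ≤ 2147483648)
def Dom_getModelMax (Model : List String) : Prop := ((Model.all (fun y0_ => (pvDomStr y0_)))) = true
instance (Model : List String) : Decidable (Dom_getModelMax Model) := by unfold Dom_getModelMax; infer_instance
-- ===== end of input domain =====

-- B replaces A's values-list + max + count + index pipeline by one running
-- (best_count, best_key, unique) scan over the dict's items; same return value everywhere.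

-- ===== PORT A =====
def getModelMax (Model : List String) : String :=
  let d : PySem.Dict String Int :=
    (PySem.List.pyRange 0 (Model.length : Int) 1).foldl
      (fun d n =>
        let x := PySem.List.pyGetD Model n ""
        if d.contains x then d.modify x 0 (· + 1) else d.setdefault x 1)
      PySem.Dict.empty
  let ind := d.values
  let model := ""
  if 0 < ind.length then
    let m := (PySem.List.max? ind (fun y => y)).getD 0
    if PySem.List.count ind m = 1 then
      let index := (PySem.List.index? ind m).getD 0
      PySem.List.pyGetD d.keys (index : Int) ""
    else model
  else model

-- ===== PORT B =====
def getModelMax_alt (Model : List String) : String :=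
  let d : PySem.Dict String Int :=
    Model.foldl (fun d x => d.insert x (d.getD x 0 + 1)) PySem.Dict.empty
  let s : Int × String × Bool :=
    d.items.foldl
      (fun s p =>
        if p.2 > s.1 then (p.2, p.1, true)
        else if p.2 = s.1 then (s.1, s.2.1, false)
        else s)
      (0, "", false)
  if s.2.2 then s.2.1 else ""

-- ===== PRECONDITION & SPEC =====
def Spec_getModelMax (Model : List String) (out : String) : Prop := out = getModelMax_alt Model
instance (Model : List String) (out : String) : Decidable (Spec_getModelMax Model out) := by unfold Spec_getModelMax; infer_instance

-- ===== CLAIM (what is proved, stated in full; the proofs are below) =====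
def Claim_equal_getModelMax : Prop := ∀ (Model : List String), Dom_getModelMax Model → Spec_getModelMax Model (getModelMax Model)

-- ===== LEMMAS AND PROOFS =====

-- A's per-element dict update equals B's.
theorem pv_step_eq (d : PySem.Dict String Int) (x : String) :
    (if d.contains x then d.modify x 0 (· + 1) else d.setdefault x 1) =
      d.insert x (d.getD x 0 + 1) := by
  by_cases h : d.contains x = true
  · simp [h, PySem.Dict.modify]
  · simp only [Bool.not_eq_true] at h
    rw [if_neg (by simp [h]), PySem.Dict.setdefault_of_not_contains d 1 h]
    simp [PySem.Dict.getD, (PySem.Dict.get?_eq_none_iff_contains d x).2 h]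

-- Both ports build the same dictionary.

-- Both ports build the same frequency dictionary.
theorem pv_dict_eq (Model : List String) :
    (PySem.List.pyRange 0 (Model.length : Int) 1).foldl
      (fun d n =>
        if d.contains (PySem.List.pyGetD Model n "") then
          d.modify (PySem.List.pyGetD Model n "") 0 (· + 1)
        else d.setdefault (PySem.List.pyGetD Model n "") 1)
      (PySem.Dict.empty : PySem.Dict String Int) =
    Model.foldl (fun d x => d.insert x (d.getD x 0 + 1)) PySem.Dict.empty := by
  have h := PySem.List.foldl_pyRange_pyGetD' Model ""
    (fun d x => if d.contains x then d.modify x 0 (· + 1) else d.setdefault x 1)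
    (PySem.Dict.empty : PySem.Dict String Int) (a := 0) le_rfl
  simp only [Int.toNat_zero, List.drop_zero] at h
  exact h.trans (List.foldl_ext _ _ _ (fun d x _ => pv_step_eq d x))

-- Every count stored in the dictionary is at least 1.
theorem pv_values_pos (Model : List String) (p : String × Int)
    (hp : p ∈ (Model.foldl (fun d x => d.insert x (d.getD x 0 + 1)) PySem.Dict.empty).items) :
    1 ≤ p.2 := by
  obtain ⟨k, v⟩ := p
  have hnd : (Model.foldl (fun d x => d.insert x (d.getD x 0 + 1)) (PySem.Dict.empty : PySem.Dict String Int)).keys.Nodup :=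
    PySem.Dict.nodup_keys_foldl_insert Model _ _ (by simp [pysem])
  have hmem : k ∈ Model := by
    have h1 := PySem.Dict.mem_keys_of_mem_items _ hp
    rw [PySem.Dict.keys_foldl_insert] at h1
    simpa [pysem] using h1
  have h2 := PySem.Dict.getD_of_mem_items _ hp hnd 0
  rw [PySem.Dict.getD_foldl_insert_add_one] at h2
  simp [pysem] at h2
  have hc : 0 < Model.count k := List.count_pos_iff.2 hmem
  simp only []
  omega

-- The running (best_count, best_key, unique) scan computes A's max/count/first-index pipeline.
theorem pv_core (l : List (String × Int)) (hpos : ∀ p ∈ l, 1 ≤ p.2) :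
    l.foldl
      (fun s p =>
        if p.2 > s.1 then (p.2, p.1, true)
        else if p.2 = s.1 then (s.1, s.2.1, false)
        else s)
      ((0 : Int), "", false) =
    ((l.map (·.2)).foldl max 0,
     PySem.List.pyGetD (l.map (·.1))
       (((PySem.List.index? (l.map (·.2)) ((l.map (·.2)).foldl max 0)).getD 0 : Nat) : Int) "",
     decide (List.count ((l.map (·.2)).foldl max 0) (l.map (·.2)) = 1)) := by
  induction l using List.reverseRecOn with
  | nil => simp [PySem.List.index?, PySem.List.pyGetD, PySem.List.pyGet?]
  | append_singleton l p ih =>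
    have hl : ∀ q ∈ l, 1 ≤ q.2 := fun q hq => hpos q (by simp [hq])
    have hp : 1 ≤ p.2 := hpos p (by simp)
    rw [List.foldl_append, ih hl]
    set M := (l.map (·.2)).foldl max 0 with hM
    have hmapf : (l ++ [p]).map (·.1) = l.map (·.1) ++ [p.1] := by simp
    have hmaps : (l ++ [p]).map (·.2) = l.map (·.2) ++ [p.2] := by simp
    have hM' : ((l ++ [p]).map (·.2)).foldl max 0 = max M p.2 := by
      rw [hmaps, List.foldl_append, ← hM]; simp
    have hub : ∀ y ∈ l.map (·.2), y ≤ M := (PySem.List.le_foldl_max _ _).2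
    rcases lt_trichotomy M p.2 with hlt | heq | hgt
    · -- new strict maximum
      have hnot : p.2 ∉ l.map (·.2) := fun h => absurd (hub _ h) (by omega)
      simp only [List.foldl_cons, List.foldl_nil]
      rw [if_pos (by exact hlt)]
      rw [hM', max_eq_right hlt.le, hmaps, hmapf]
      rw [PySem.List.index?_append_singleton_self _ _ hnot]
      rw [List.count_append, List.count_eq_zero_of_not_mem hnot]
      simp only [Option.getD_some, List.length_map]
      rw [PySem.List.pyGetD_natCast]
      rw [List.getD_eq_getElem?_getD]
      have : l.length = (l.map (·.1)).length := by simp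
      rw [this, List.getElem?_concat_length]
      simp
    · -- tie with the current maximum
      have hMmem : M ∈ l.map (·.2) := by
        rcases PySem.List.foldl_max_mem (l.map (·.2)) 0 with h0 | h
        · omega
        · exact h
      simp only [List.foldl_cons, List.foldl_nil]
      rw [if_neg (by omega), if_pos heq.symm]
      rw [hM', max_eq_left heq.ge, hmaps, hmapf]
      rw [PySem.List.index?_append_of_mem _ hMmem]
      obtain ⟨i, hi⟩ := Option.isSome_iff_exists.1 ((PySem.List.index?_isSome_iff _ _).2 hMmem)
      obtain ⟨hilt, -, -⟩ := PySem.List.getElem_of_index?_eq_some hi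
      rw [hi]
      simp only [Option.getD_some]
      rw [PySem.List.pyGetD_natCast, PySem.List.pyGetD_natCast]
      rw [List.getD_eq_getElem?_getD, List.getD_eq_getElem?_getD,
        List.getElem?_append_left (by simpa using hilt)]
      rw [List.count_append, List.count_singleton, if_pos (by exact beq_iff_eq.2 heq.symm)]
      have hc : 0 < List.count M (l.map (·.2)) := List.count_pos_iff.2 hMmem
      rw [decide_eq_false (by omega)]
    · -- smaller than the current maximum
      have hMmem : M ∈ l.map (·.2) := by
        rcases PySem.List.foldl_max_mem (l.map (·.2)) 0 with h0 | h
        · omega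
        · exact h
      simp only [List.foldl_cons, List.foldl_nil]
      rw [if_neg (by omega), if_neg (by omega)]
      rw [hM', max_eq_left hgt.le, hmaps, hmapf]
      rw [PySem.List.index?_append_of_mem _ hMmem]
      obtain ⟨i, hi⟩ := Option.isSome_iff_exists.1 ((PySem.List.index?_isSome_iff _ _).2 hMmem)
      obtain ⟨hilt, -, -⟩ := PySem.List.getElem_of_index?_eq_some hi
      rw [hi]
      simp only [Option.getD_some]
      rw [PySem.List.pyGetD_natCast, PySem.List.pyGetD_natCast]
      rw [List.getD_eq_getElem?_getD, List.getD_eq_getElem?_getD,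
        List.getElem?_append_left (by simpa using hilt)]
      rw [List.count_append, List.count_singleton, if_neg (by simp; omega)]
      simp

theorem getModelMax_eq_alt (Model : List String) : getModelMax Model = getModelMax_alt Model := by
  simp only [getModelMax, getModelMax_alt]
  rw [pv_dict_eq]
  set d := Model.foldl (fun d x => d.insert x (d.getD x 0 + 1)) (PySem.Dict.empty : PySem.Dict String Int) with hd
  have hpos : ∀ p ∈ d.items, 1 ≤ p.2 := fun p hp => pv_values_pos Model p hp
  rw [pv_core d.items hpos]
  have hv : d.values = d.items.map (·.2) := rfl
  have hk : d.keys = d.items.map (·.1) := rfl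
  rw [hv, hk]
  cases hitems : d.items with
  | nil => simp
  | cons q t =>
    have hq : 1 ≤ q.2 := hpos q (by simp [hitems])
    have hmax : (((q :: t).map (·.2)).foldl max 0) = ((t.map (·.2)).foldl max q.2) := by
      simp [max_eq_right (by omega : (0:Int) ≤ q.2)]
    simp only [List.map_cons, List.length_cons, Nat.zero_lt_succ, if_pos,
      PySem.List.max?_id_cons, Option.getD_some, PySem.List.count_eq]
    simp only [List.map_cons] at hmax
    simp only [hmax]
    by_cases hc : List.count (List.foldl max q.2 (t.map (·.2))) (q.2 :: t.map (·.2)) = 1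
    · simp [hc]
    · simp [hc]

-- ===== VERDICT (by name: the statement is the Claim_ definition above) =====
theorem getModelMax_spec : Claim_equal_getModelMax := by
  intro Model _
  unfold Spec_getModelMax
  exact getModelMax_eq_alt Model
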